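-- pv_equiv track=rewrite | github.com/MontelioneLab/CSP_UBQ | scripts/receptor_msa.py | _residue_block_spans
-- ===== SOURCE A (Python) =====
-- from typing import List, Optional, Tuple
--
-- def _residue_block_spans(C: str, center: str) -> List[Tuple[int, int]]:
--     """Half-open [start,end) per residue: leading gaps for that residue + the residue letter."""
--     L = len(center)
--     spans: List[Tuple[int, int]] = []
--     i = 0
--     for r in range(L):
--         start = i
--         while i < len(C) and C[i] == "-":
--             i += 1
--         if i >= len(C) or C[i].upper() != center[r].upper():
--             raise ValueError("premature end or residue mismatch in gapped reference")
--         i += 1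
--         end = i
--         spans.append((start, end))
--     while i < len(C) and C[i] == "-":
--         i += 1
--     if i != len(C):
--         raise ValueError("trailing non-gap content in gapped reference")
--     return spans
-- ===== SOURCE B (Python) =====
-- from typing import List, Tuple
--
-- def _residue_block_spans(C: str, center: str) -> List[Tuple[int, int]]:
--     """Half-open [start,end) per residue: leading gaps for that residue + the residue letter."""
--     letters = [(j, ch) for j, ch in enumerate(C) if ch != "-"]
--     spans: List[Tuple[int, int]] = []
--     prev = 0
--     for r in range(len(center)):
--         if r >= len(letters) or letters[r][1].upper() != center[r].upper():
--             raise ValueError("premature end or residue mismatch in gapped reference")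
--         end = letters[r][0] + 1
--         spans.append((prev, end))
--         prev = end
--     if len(letters) != len(center):
--         raise ValueError("trailing non-gap content in gapped reference")
--     return spans
-- ===== Notes on version B (the rewrite author's own statement) =====
-- stated objective: alternative
-- what changed: A walks a cursor through C with an inner gap-skipping while-loop per residue; B precomputes the list of (position, letter) of all non-gap characters in one pass and then pairs it with center, deriving each span as (previous end, letter position + 1) with no inner scan.
-- outside the precondition, e.g. on _residue_block_spans('a-', 'ab'): A raises ValueError, B raises ValueError; on _residue_block_spans('ab', 'a'): A raises ValueError, B raises ValueError
import Mathlib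
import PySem

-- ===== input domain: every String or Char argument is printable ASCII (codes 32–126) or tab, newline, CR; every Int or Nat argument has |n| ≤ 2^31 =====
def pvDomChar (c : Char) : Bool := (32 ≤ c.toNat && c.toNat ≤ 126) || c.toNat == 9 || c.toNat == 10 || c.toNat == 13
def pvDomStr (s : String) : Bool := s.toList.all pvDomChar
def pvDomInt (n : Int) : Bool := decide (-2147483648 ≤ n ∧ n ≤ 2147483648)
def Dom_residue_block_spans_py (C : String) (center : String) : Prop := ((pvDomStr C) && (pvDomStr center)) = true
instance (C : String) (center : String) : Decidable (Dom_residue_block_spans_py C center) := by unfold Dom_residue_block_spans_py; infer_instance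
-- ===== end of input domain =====

-- B replaces A's cursor-plus-inner-gap-skipping-while-loop with a precomputed (position, letter)
-- list of the non-gap characters, paired against center (objective: alternative decomposition).

-- ===== PORT A =====
-- inner 'while i < len(C) and C[i] == "-": i += 1' of A
def pvSkipGaps (cs : List Char) (i : Nat) : Nat :=
  if h : i < cs.length ∧ cs[i]! = '-' then pvSkipGaps cs (i + 1) else i
termination_by cs.length - i
decreasing_by omega

-- A's 'for r in range(L)' loop over the residues of center, state (i, spans-accumulator);
-- where Python raises ValueError the port returns [] (those inputs are outside Pre_).
def pvALoop (cs : List Char) (rs : List Char) (i : Nat) (acc : List (Int × Int)) :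
    List (Int × Int) :=
  match rs with
  | [] =>
    let i' := pvSkipGaps cs i
    if i' ≠ cs.length then []          -- raise ValueError("trailing non-gap content …")
    else acc.reverse
  | r :: rest =>
    let start := i
    let i' := pvSkipGaps cs i
    if cs.length ≤ i' ∨ PySem.Chars.upperChar cs[i']! ≠ PySem.Chars.upperChar r then
      []                               -- raise ValueError("premature end or residue mismatch …")
    else
      pvALoop cs rest (i' + 1) (((start : Int), ((i' : Int) + 1)) :: acc)

def residue_block_spans_py (C : String) (center : String) : List (Int × Int) :=
  pvALoop C.toList center.toList 0 []

-- ===== PORT B =====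
-- B's 'for r in range(len(center))' loop consumes center and the letters list in step;
-- where Python raises ValueError the port returns [] (those inputs are outside Pre_).
def pvBLoop (rs : List Char) (letters : List (Int × Char)) (prev : Int) : List (Int × Int) :=
  match rs, letters with
  | [], [] => []
  | [], _ :: _ => []                   -- raise ValueError("trailing non-gap content …")
  | _ :: _, [] => []                   -- raise ValueError("premature end or residue mismatch …")
  | r :: rest, (j, ch) :: ls =>
    if PySem.Chars.upperChar ch ≠ PySem.Chars.upperChar r then
      []                               -- raise ValueError("premature end or residue mismatch …")
    else
      (prev, j + 1) :: pvBLoop rest ls (j + 1)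

def residue_block_spans_py_alt (C : String) (center : String) : List (Int × Int) :=
  let letters := (PySem.List.enumerate C.toList 0).filter (fun p => p.2 ≠ '-')
  pvBLoop center.toList letters 0

-- ===== PRECONDITION & SPEC =====
-- Pre_ excludes exactly the inputs on which A raises ValueError: the case-insensitive sequence
-- of non-gap characters of C must be exactly center.
def pvPreLetters (C : String) : List Char := C.toList.filter (fun c => c ≠ '-')
def Pre_residue_block_spans_py (C : String) (center : String) : Prop :=
  center.toList.length = (pvPreLetters C).length ∧
  ∀ p ∈ center.toList.zip (pvPreLetters C),
    PySem.Chars.upperChar p.1 = PySem.Chars.upperChar p.2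
instance (C : String) (center : String) : Decidable (Pre_residue_block_spans_py C center) := by
  unfold Pre_residue_block_spans_py; infer_instance

def pvWitness_residue_block_spans_py : String × String := ("-a-b", "AB")

def Spec_residue_block_spans_py (C : String) (center : String) (out : List (Int × Int)) : Prop :=
  out = residue_block_spans_py_alt C center
instance (C : String) (center : String) (out : List (Int × Int)) :
    Decidable (Spec_residue_block_spans_py C center out) := by
  unfold Spec_residue_block_spans_py; infer_instance

-- ===== CLAIM (what is proved, stated in full; the proofs are below) =====
def Claim_equal_residue_block_spans_py : Prop :=
  ∀ (C : String) (center : String), Dom_residue_block_spans_py C center →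
    Pre_residue_block_spans_py C center →
    Spec_residue_block_spans_py C center (residue_block_spans_py C center)

-- ===== LEMMAS AND PROOFS =====

-- proof-side view: the (position, letter) pairs of the suffix cs.drop i, positions absolute
def pvGL (cs : List Char) (i : Nat) : List (Nat × Char) :=
  match cs with
  | [] => []
  | c :: rest => if c = '-' then pvGL rest (i + 1) else (i, c) :: pvGL rest (i + 1)

theorem pvGL_enum : ∀ (cs : List Char) (i : Nat),
    (PySem.List.enumerate cs (i : Int)).filter (fun p => p.2 ≠ '-')
      = (pvGL cs i).map (fun p => ((p.1 : Int), p.2)) := by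
  intro cs
  induction cs with
  | nil => intro i; simp [pvGL, PySem.List.enumerate_nil]
  | cons c rest ih =>
    intro i
    have h1 := ih (i + 1)
    push_cast at h1
    by_cases hc : c = '-' <;>
      simp [pvGL, PySem.List.enumerate_cons, hc] <;>
      simpa using h1

theorem pvGL_filter : ∀ (cs : List Char) (i : Nat),
    (pvGL cs i).map (·.2) = cs.filter (fun c => c ≠ '-') := by
  intro cs
  induction cs with
  | nil => intro i; simp [pvGL]
  | cons c rest ih =>
    intro i
    by_cases hc : c = '-' <;> simp [pvGL, hc, ih (i + 1)]

-- characterisation of A's gap-skip against the letters view of the suffix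
theorem pvSkip_spec (cs : List Char) : ∀ i, i ≤ cs.length →
    (pvGL (cs.drop i) i = [] → pvSkipGaps cs i = cs.length) ∧
    (∀ j ch t, pvGL (cs.drop i) i = (j, ch) :: t →
      pvSkipGaps cs i = j ∧ j < cs.length ∧ cs[j]! = ch ∧
      pvGL (cs.drop (j + 1)) (j + 1) = t) := by
  have main : ∀ k i, cs.length - i ≤ k → i ≤ cs.length →
      (pvGL (cs.drop i) i = [] → pvSkipGaps cs i = cs.length) ∧
      (∀ j ch t, pvGL (cs.drop i) i = (j, ch) :: t →
        pvSkipGaps cs i = j ∧ j < cs.length ∧ cs[j]! = ch ∧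
        pvGL (cs.drop (j + 1)) (j + 1) = t) := by
    intro k
    induction k with
    | zero =>
      intro i hk hi
      have hieq : i = cs.length := by omega
      subst hieq
      constructor
      · intro _
        rw [pvSkipGaps]
        simp
      · intro j ch t hglc
        rw [List.drop_length] at hglc
        simp [pvGL] at hglc
    | succ k ih =>
      intro i hk hi
      rcases Nat.lt_or_ge i cs.length with hlt | hge
      · -- i < cs.length : drop i = cs[i] :: drop (i+1)
        have hdrop : cs.drop i = cs[i] :: cs.drop (i + 1) := List.drop_eq_getElem_cons hlt
        have hbang : cs[i]! = cs[i] := getElem!_pos cs i hlt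
        have ih' := ih (i + 1) (by omega) (by omega)
        by_cases hc : cs[i] = '-'
        · -- gap: both skip to i+1
          have hskip : pvSkipGaps cs i = pvSkipGaps cs (i + 1) := by
            rw [pvSkipGaps]
            simp [hlt, hc]
          have hgl : pvGL (cs.drop i) i = pvGL (cs.drop (i + 1)) (i + 1) := by
            rw [hdrop]
            simp [pvGL, hc]
          rw [hgl, hskip]
          exact ih'
        · -- letter at i
          have hskip : pvSkipGaps cs i = i := by
            rw [pvSkipGaps]
            simp [hbang, hc]
          have hgl : pvGL (cs.drop i) i = (i, cs[i]) :: pvGL (cs.drop (i + 1)) (i + 1) := by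
            rw [hdrop]
            simp [pvGL, hc]
          constructor
          · intro hnil
            rw [hgl] at hnil
            simp at hnil
          · intro j ch t hcons
            rw [hgl] at hcons
            obtain ⟨h1, h2⟩ := List.cons.injEq .. ▸ hcons
            obtain ⟨hj, hch⟩ := Prod.mk.injEq .. ▸ h1
            subst hj
            exact ⟨hskip, hlt, hch ▸ hbang, h2⟩
      · -- i = cs.length
        have hieq : i = cs.length := by omega
        subst hieq
        constructor
        · intro _
          rw [pvSkipGaps]
          simp
        · intro j ch t hglc
          rw [List.drop_length] at hglc
          simp [pvGL] at hglc
  intro i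
  exact main (cs.length - i) i le_rfl

theorem pvMain (cs : List Char) : ∀ (rs : List Char) (i : Nat) (acc : List (Int × Int)),
    i ≤ cs.length →
    List.Forall₂ (fun r (p : Nat × Char) =>
      PySem.Chars.upperChar p.2 = PySem.Chars.upperChar r) rs (pvGL (cs.drop i) i) →
    pvALoop cs rs i acc
      = acc.reverse ++ pvBLoop rs ((pvGL (cs.drop i) i).map (fun p => ((p.1 : Int), p.2))) i := by
  intro rs
  induction rs with
  | nil =>
    intro i acc hi h
    have hnil : pvGL (cs.drop i) i = [] := List.forall₂_nil_left_iff.mp h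
    have hskip := (pvSkip_spec cs i hi).1 hnil
    simp [pvALoop, hskip, hnil, pvBLoop]
  | cons r rest ih =>
    intro i acc hi h
    cases hgl : pvGL (cs.drop i) i with
    | nil => rw [hgl] at h; cases h
    | cons p t =>
      obtain ⟨j, ch⟩ := p
      rw [hgl] at h
      cases h with
      | cons hrel htail =>
        obtain ⟨hskip, hjlt, hbang, ht⟩ := (pvSkip_spec cs i hi).2 j ch t hgl
        have hj : cs[j] = ch := by rw [← getElem!_pos cs j hjlt]; exact hbang
        have hcond : ¬ (cs.length ≤ j ∨
            PySem.Chars.upperChar cs[j]! ≠ PySem.Chars.upperChar r) := by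
          refine not_or.mpr ⟨by omega, not_not.mpr ?_⟩
          simpa [getElem!_pos cs j hjlt, List.getElem?_eq_getElem hjlt, hj] using hrel
        have ihx := ih (j + 1) (((i : Int), ((j : Int) + 1)) :: acc) (by omega) (ht ▸ htail)
        rw [ht] at ihx
        simp only [pvALoop, hskip, if_neg hcond]
        push_cast at ihx ⊢
        rw [ihx]
        simp [pvBLoop, hrel, List.append_assoc]

theorem pvPre_forall₂ (C center : String) (h : Pre_residue_block_spans_py C center) :
    List.Forall₂ (fun r (p : Nat × Char) =>
      PySem.Chars.upperChar p.2 = PySem.Chars.upperChar r)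
      center.toList (pvGL C.toList 0) := by
  obtain ⟨hlen, hzip⟩ := h
  have hmap : (pvGL C.toList 0).map (·.2) = pvPreLetters C := pvGL_filter C.toList 0
  have hlen2 : center.toList.length = (pvGL C.toList 0).length := by
    rw [hlen, ← hmap, List.length_map]
  rw [List.forall₂_iff_zip]
  refine ⟨hlen2, ?_⟩
  intro a b hab
  have h2 : (a, b.2) ∈ center.toList.zip ((pvGL C.toList 0).map (·.2)) := by
    rw [List.zip_map_right]
    exact List.mem_map.mpr ⟨(a, b), hab, rfl⟩
  rw [hmap] at h2
  exact (hzip _ h2).symm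

-- ===== VERDICT (by name: the statement is the Claim_ definition above) =====
theorem residue_block_spans_py_spec : Claim_equal_residue_block_spans_py := by
  intro C center _ hpre
  have h := pvMain C.toList center.toList 0 [] (Nat.zero_le _)
    (by rw [List.drop_zero]; exact pvPre_forall₂ C center hpre)
  rw [List.drop_zero] at h
  have he := pvGL_enum C.toList 0
  push_cast at he
  unfold Spec_residue_block_spans_py residue_block_spans_py residue_block_spans_py_alt
  show pvALoop C.toList center.toList 0 []
      = pvBLoop center.toList
          ((PySem.List.enumerate C.toList 0).filter (fun p => p.2 ≠ '-')) 0
  rw [h, he]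
  simp
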